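-- pv_equiv track=rewrite | github.com/chaeni1105/CodingTest-Study | 이채은_214594_HW01/2_디저트나눔사건.py | bfs
-- ===== SOURCE A (Python) =====
-- from collections import deque
--
-- def bfs(cx, cy, radius):
--     visited = set() # 방문한 인공지능학부 학생들의 좌표를 저장할 set
--     dx = [-1, 0, 1, 0] # 상하좌우
--     dy = [0, 1, 0, -1]
--
--     q = deque([(cx, cy)])
--     cnt = 0 # 디저트를 받은 인공지능학부 학생 수
--
--     def is_ai_student(x, y):
--         sum_digits = sum(map(int, str(abs(x) + abs(y))))
--         return sum_digits <= 16 and sum_digits % 2 == 0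
--
--     while q:
--         x, y = q.popleft()
--         if abs(x - cx) ** 2 + abs(y - cy) ** 2 > radius ** 2:
--             continue # 주어진 영역을 벗어난 경우
--
--         if is_ai_student(x, y) and (x, y) not in visited:
--             visited.add((x, y))
--             cnt += 1
--
--         for i in range(4):
--             nx, ny = x + dx[i], y + dy[i]
--             if abs(nx - cx) ** 2 + abs(ny - cy) ** 2 <= radius ** 2:
--                 if is_ai_student(nx, ny) and (nx, ny) not in visited:
--                     visited.add((nx, ny))
--                     q.append((nx, ny))
--
--     return cnt
-- ===== SOURCE B (Python) =====
-- def bfs(cx, cy, radius):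
--     # Neighbours are marked visited at enqueue time, so only the start cell can
--     # ever pass the count guard: the answer is the AI-student test at the centre.
--     s = sum(map(int, str(abs(cx) + abs(cy))))
--     return 1 if s <= 16 and s % 2 == 0 else 0
-- ===== Notes on version B (the rewrite author's own statement) =====
-- stated objective: simpler
-- what changed: Replaced the whole BFS (queue, visited set, neighbour scan) by the closed-form digit-sum test on the centre cell: since neighbours enter visited at enqueue time, only the start cell can ever increment cnt, so A returns 1 iff the centre is an AI-student, independent of radius.
import Mathlib
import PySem

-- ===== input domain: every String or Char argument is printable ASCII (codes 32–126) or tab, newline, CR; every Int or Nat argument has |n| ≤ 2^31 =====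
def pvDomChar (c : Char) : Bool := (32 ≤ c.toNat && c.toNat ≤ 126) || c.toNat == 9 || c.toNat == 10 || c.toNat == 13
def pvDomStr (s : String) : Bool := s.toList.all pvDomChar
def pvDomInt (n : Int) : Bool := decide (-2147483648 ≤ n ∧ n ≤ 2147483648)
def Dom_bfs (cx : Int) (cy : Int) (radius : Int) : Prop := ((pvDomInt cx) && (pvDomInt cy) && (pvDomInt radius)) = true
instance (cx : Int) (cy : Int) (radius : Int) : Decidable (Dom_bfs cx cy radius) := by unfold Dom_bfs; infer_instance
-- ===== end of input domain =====

-- B replaces A's BFS (queue + visited set + neighbour scan) by the closed-form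
-- digit-sum test on the centre cell; objective: simpler.

-- ===== PORT A =====
-- shared helper: sum(map(int, str(abs(x) + abs(y)))) — this exact expression occurs in
-- both Pythons; int(c) is ported as c.toNat - 48, exact on the decimal digit characters
-- that str() of a nonnegative int produces.
def pvDigitSum (x : Int) (y : Int) : Int :=
  ((PySem.Int.toChars (|x| + |y|)).map (fun c => ((c.toNat : Int) - 48))).sum

-- A's inner function is_ai_student
def pvIsAi (x : Int) (y : Int) : Bool :=
  decide (pvDigitSum x y ≤ 16) && (PySem.Int.mod (pvDigitSum x y) 2 == 0)

-- the body of A's 'for i in range(4)' neighbour loop, for one direction d = (dx[i], dy[i]);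
-- nx = x + dx[i], ny = y + dy[i] are inlined
def bfsStep (cx : Int) (cy : Int) (radius : Int) (x : Int) (y : Int)
    (st : List (Int × Int) × PySem.Set (Int × Int)) (d : Int × Int) :
    List (Int × Int) × PySem.Set (Int × Int) :=
  if (decide (|x + d.1 - cx| ^ 2 + |y + d.2 - cy| ^ 2 ≤ radius ^ 2)
      && pvIsAi (x + d.1) (y + d.2) && !(PySem.Set.contains st.2 (x + d.1, y + d.2))) then
    (st.1 ++ [(x + d.1, y + d.2)], PySem.Set.add st.2 (x + d.1, y + d.2))
  else st

-- A's neighbour loop: the body applied to the four (dx[i], dy[i]) pairs in order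
def bfsSteps (cx : Int) (cy : Int) (radius : Int) (x : Int) (y : Int)
    (st : List (Int × Int) × PySem.Set (Int × Int)) :
    List (Int × Int) × PySem.Set (Int × Int) :=
  bfsStep cx cy radius x y
    (bfsStep cx cy radius x y
      (bfsStep cx cy radius x y
        (bfsStep cx cy radius x y st (-1, 0)) (0, 1)) (1, 0)) (0, -1)

-- A's while loop. The fuel argument only makes the recursion structural (a totality
-- guard, no change of algorithm): every enqueued cell is inside the radius disk and is
-- added to visited at enqueue time, so each of the at most (2*|radius|+1)^2 disk cells
-- is enqueued at most once; the fuel bfs supplies strictly exceeds 1 + that bound, so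
-- the 0-fuel arm is never reached on any input.
def bfsLoop (cx : Int) (cy : Int) (radius : Int) (fuel : Nat)
    (q : List (Int × Int)) (visited : PySem.Set (Int × Int)) (cnt : Int) : Int :=
  match fuel, q with
  | _, [] => cnt
  | 0, _ => cnt
  | fuel + 1, (x, y) :: qs =>
    if |x - cx| ^ 2 + |y - cy| ^ 2 > radius ^ 2 then
      bfsLoop cx cy radius fuel qs visited cnt
    else if pvIsAi x y && !(PySem.Set.contains visited (x, y)) then
      let st := bfsSteps cx cy radius x y (qs, PySem.Set.add visited (x, y))
      bfsLoop cx cy radius fuel st.1 st.2 (cnt + 1)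
    else
      let st := bfsSteps cx cy radius x y (qs, visited)
      bfsLoop cx cy radius fuel st.1 st.2 cnt

def bfs (cx : Int) (cy : Int) (radius : Int) : Int :=
  bfsLoop cx cy radius ((2 * radius.natAbs + 3) ^ 2 + 2) [(cx, cy)] PySem.Set.empty 0

-- ===== PORT B =====
def bfs_alt (cx : Int) (cy : Int) (radius : Int) : Int :=
  let s := pvDigitSum cx cy
  if s ≤ 16 ∧ PySem.Int.mod s 2 = 0 then 1 else 0

-- ===== PRECONDITION & SPEC =====
def Spec_bfs (cx : Int) (cy : Int) (radius : Int) (out : Int) : Prop := out = bfs_alt cx cy radius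
instance (cx : Int) (cy : Int) (radius : Int) (out : Int) : Decidable (Spec_bfs cx cy radius out) := by unfold Spec_bfs; infer_instance

-- ===== CLAIM (what is proved, stated in full; the proofs are below) =====
def Claim_equal_bfs : Prop := ∀ (cx : Int) (cy : Int) (radius : Int), Dom_bfs cx cy radius → Spec_bfs cx cy radius (bfs cx cy radius)

-- ===== LEMMAS AND PROOFS =====

lemma bfsStep_inv (cx cy radius x y : Int)
    (st : List (Int × Int) × PySem.Set (Int × Int)) (d : Int × Int)
    (h : ∀ p ∈ st.1, p ∈ st.2) :
    ∀ p ∈ (bfsStep cx cy radius x y st d).1, p ∈ (bfsStep cx cy radius x y st d).2 := by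
  intro p hp
  unfold bfsStep at hp ⊢
  by_cases hc : (decide (|x + d.1 - cx| ^ 2 + |y + d.2 - cy| ^ 2 ≤ radius ^ 2)
      && pvIsAi (x + d.1) (y + d.2) && !(PySem.Set.contains st.2 (x + d.1, y + d.2))) = true
  · rw [if_pos hc] at hp ⊢
    rcases List.mem_append.mp hp with h1 | h2
    · exact (PySem.Set.mem_add _ _ _).mpr (Or.inl (h p h1))
    · exact (PySem.Set.mem_add _ _ _).mpr (Or.inr (List.mem_singleton.mp h2))
  · rw [if_neg hc] at hp ⊢
    exact h p hp

lemma bfsSteps_inv (cx cy radius x y : Int)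
    (st : List (Int × Int) × PySem.Set (Int × Int))
    (h : ∀ p ∈ st.1, p ∈ st.2) :
    ∀ p ∈ (bfsSteps cx cy radius x y st).1, p ∈ (bfsSteps cx cy radius x y st).2 := by
  unfold bfsSteps
  exact bfsStep_inv _ _ _ _ _ _ _
    (bfsStep_inv _ _ _ _ _ _ _
      (bfsStep_inv _ _ _ _ _ _ _
        (bfsStep_inv _ _ _ _ _ _ _ h)))

-- every queued cell is already visited ⇒ the loop never increments cnt again
lemma bfsLoop_const (cx cy radius : Int) (fuel : Nat) :
    ∀ (q : List (Int × Int)) (visited : PySem.Set (Int × Int)) (cnt : Int),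
      (∀ p ∈ q, p ∈ visited) → bfsLoop cx cy radius fuel q visited cnt = cnt := by
  induction fuel with
  | zero =>
    intro q visited cnt _
    cases q <;> rfl
  | succ f ih =>
    intro q visited cnt h
    cases q with
    | nil => rfl
    | cons hd tl =>
      obtain ⟨x, y⟩ := hd
      simp only [bfsLoop]
      split_ifs with h0 h1
      · exact ih tl visited cnt (fun p hp => h p (List.mem_cons_of_mem _ hp))
      · exfalso
        have hx : (x, y) ∈ visited := h (x, y) List.mem_cons_self
        simp at h1
        exact h1.2 hx
      · exact ih _ _ _ (bfsSteps_inv _ _ _ _ _ _ (fun p hp => h p (List.mem_cons_of_mem _ hp)))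

lemma bfsLoop_cons (cx cy radius : Int) (f : Nat) (x y : Int) (qs : List (Int × Int))
    (visited : PySem.Set (Int × Int)) (cnt : Int) :
    bfsLoop cx cy radius (f + 1) ((x, y) :: qs) visited cnt =
      if |x - cx| ^ 2 + |y - cy| ^ 2 > radius ^ 2 then
        bfsLoop cx cy radius f qs visited cnt
      else if pvIsAi x y && !(PySem.Set.contains visited (x, y)) then
        let st := bfsSteps cx cy radius x y (qs, PySem.Set.add visited (x, y))
        bfsLoop cx cy radius f st.1 st.2 (cnt + 1)
      else
        let st := bfsSteps cx cy radius x y (qs, visited)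
        bfsLoop cx cy radius f st.1 st.2 cnt := rfl

lemma bfs_closed (cx cy radius : Int) :
    bfs cx cy radius = if pvIsAi cx cy then 1 else 0 := by
  unfold bfs
  have hf : (2 * radius.natAbs + 3) ^ 2 + 2 = ((2 * radius.natAbs + 3) ^ 2 + 1) + 1 := rfl
  rw [hf, bfsLoop_cons]
  have h0 : ¬ (|cx - cx| ^ 2 + |cy - cy| ^ 2 > radius ^ 2) := by
    simp only [sub_self, abs_zero]
    nlinarith [sq_nonneg radius]
  rw [if_neg h0]
  by_cases hai : pvIsAi cx cy
  · rw [if_pos (by simp [hai, PySem.Set.empty])]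
    rw [bfsLoop_const _ _ _ _ _ _ _ (bfsSteps_inv _ _ _ _ _ _ (by simp))]
    simp [hai]
  · rw [if_neg (by simp [hai])]
    rw [bfsLoop_const _ _ _ _ _ _ _ (bfsSteps_inv _ _ _ _ _ _ (by simp))]
    simp [hai]

-- ===== VERDICT (by name: the statement is the Claim_ definition above) =====
theorem bfs_spec : Claim_equal_bfs := by
  intro cx cy radius _
  unfold Spec_bfs bfs_alt
  rw [bfs_closed]
  unfold pvIsAi
  by_cases h1 : pvDigitSum cx cy ≤ 16 <;> by_cases h2 : PySem.Int.mod (pvDigitSum cx cy) 2 = 0 <;>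
    simp_all
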